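-- pv_equiv track=rewrite | github.com/Leapense/problems | 28447번: 마라탕 재료 고르기/solution.py | max_taste
-- ===== SOURCE A (Python) =====
-- import itertools
--
-- def max_taste(n, k, C):
--     best = -10**18
--     for combo in itertools.combinations(range(n), k):
--         s = 0
--         for i in range(k):
--             for j in range(i + 1, k):
--                 s += C[combo[i]][combo[j]]
--         if s > best:
--             best = s
--     return best if best != -10**18 else 0
-- ===== SOURCE B (Python) =====
-- def max_taste(n, k, C):
--     # DFS over increasing-index k-subsets carrying the running pairwise-weight sum.
--     def dfs(start, chosen, s, rem):
--         if rem == 0: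
--             return s
--         best = -10**18
--         for e in range(start, n - rem + 1):
--             t = dfs(e + 1, chosen + [e], s + sum(C[x][e] for x in chosen), rem - 1)
--             if t > best:
--                 best = t
--         return best
--     best = dfs(0, [], 0, k)
--     return best if best != -10**18 else 0
-- ===== Notes on version B (the rewrite author's own statement) =====
-- stated objective: alternative
-- what changed: Replaces itertools.combinations plus a nested all-pairs rescoring loop by a recursive DFS that builds increasing-index k-subsets while carrying the running pairwise-weight sum incrementally (each new element adds only its weights to the already-chosen elements).
import Mathlib
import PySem

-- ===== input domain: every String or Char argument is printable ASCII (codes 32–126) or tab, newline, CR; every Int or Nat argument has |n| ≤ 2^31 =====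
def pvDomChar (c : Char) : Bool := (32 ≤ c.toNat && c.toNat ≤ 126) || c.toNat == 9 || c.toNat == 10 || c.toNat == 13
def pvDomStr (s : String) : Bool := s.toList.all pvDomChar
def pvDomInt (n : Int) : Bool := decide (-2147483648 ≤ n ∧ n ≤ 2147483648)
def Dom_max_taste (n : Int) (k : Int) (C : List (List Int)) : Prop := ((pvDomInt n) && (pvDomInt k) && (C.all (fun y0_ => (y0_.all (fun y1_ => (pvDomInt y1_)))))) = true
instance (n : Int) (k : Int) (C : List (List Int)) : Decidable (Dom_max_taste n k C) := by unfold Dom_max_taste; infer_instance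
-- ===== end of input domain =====

-- B replaces the combinations+all-pairs-rescoring loop of A by a DFS over increasing-index
-- k-subsets that carries the running pairwise-weight sum incrementally (alternative decomposition).


-- C[x][y] with Python defaults (indices are in range on Pre_-admitted inputs)
def pvCell (C : List (List Int)) (x y : Int) : Int :=
  PySem.List.pyGetD (PySem.List.pyGetD C x []) y 0

-- ===== PORT A =====
-- itertools.combinations(range n, k) in its lexicographic yield order
def combsA : Nat → List Int → List (List Int)
  | 0, _ => [[]]
  | _+1, [] => []
  | r+1, x :: xs => (combsA r xs).map (fun c => x :: c) ++ combsA (r+1) xs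

-- the nested 'for i in range(k): for j in range(i+1, k): s += C[combo[i]][combo[j]]'
def scoreA (C : List (List Int)) (k : Int) (combo : List Int) : Int :=
  (PySem.List.pyRange 0 k 1).foldl (fun s i =>
    (PySem.List.pyRange (i+1) k 1).foldl (fun s j =>
      s + pvCell C (PySem.List.pyGetD combo i 0) (PySem.List.pyGetD combo j 0)) s) 0

def max_taste (n : Int) (k : Int) (C : List (List Int)) : Int :=
  let best := (combsA k.toNat (PySem.List.pyRange 0 n 1)).foldl
    (fun best combo => let s := scoreA C k combo; if s > best then s else best) (-10^18)
  if best ≠ -10^18 then best else 0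

-- ===== PORT B =====
def dfsB (C : List (List Int)) (n : Int) : Nat → Int → List Int → Int → Int
  | 0, _start, _chosen, s => s
  | r+1, start, chosen, s =>
    (PySem.List.pyRange start (n - ((r : Int) + 1) + 1) 1).foldl
      (fun best e =>
        let t := dfsB C n r (e + 1) (chosen ++ [e])
                   (s + (chosen.map (fun x => pvCell C x e)).sum)
        if t > best then t else best)
      (-10^18)

def max_taste_alt (n : Int) (k : Int) (C : List (List Int)) : Int :=
  let best := dfsB C n k.toNat 0 [] 0
  if best ≠ -10^18 then best else 0

-- ===== PRECONDITION & SPEC =====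
-- Pre_ excludes exactly the inputs where the Python A raises: k < 0 (ValueError from
-- itertools.combinations) and, when a pair is actually scored (2 ≤ k ≤ n), a C too short
-- for the accessed rows/columns (IndexError).
def Pre_max_taste (n : Int) (k : Int) (C : List (List Int)) : Prop :=
  0 ≤ k ∧ (2 ≤ k ∧ k ≤ n →
    (n - 1 ≤ (C.length : Int) ∧ ∀ row ∈ C.take (n - 1).toNat, n ≤ (row.length : Int)))
instance (n : Int) (k : Int) (C : List (List Int)) : Decidable (Pre_max_taste n k C) := by
  unfold Pre_max_taste; infer_instance

def pvWitness_max_taste : Int × Int × List (List Int) := (3, 2, [[0, 1, 2], [0, 0, 3], [0, 0, 0]])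

def Spec_max_taste (n : Int) (k : Int) (C : List (List Int)) (out : Int) : Prop := out = max_taste_alt n k C
instance (n : Int) (k : Int) (C : List (List Int)) (out : Int) : Decidable (Spec_max_taste n k C out) := by unfold Spec_max_taste; infer_instance

-- ===== CLAIM (what is proved, stated in full; the proofs are below) =====
def Claim_equal_max_taste : Prop := ∀ (n : Int) (k : Int) (C : List (List Int)), Dom_max_taste n k C → Pre_max_taste n k C → Spec_max_taste n k C (max_taste n k C)

-- ===== LEMMAS AND PROOFS =====

-- structural pairwise score of a subset (in increasing order): sum over ordered pairs
def pscore (C : List (List Int)) : List Int → Int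
  | [] => 0
  | x :: xs => (xs.map (pvCell C x)).sum + pscore C xs

-- cross weight between two blocks
def cross (C : List (List Int)) (chosen c : List Int) : Int :=
  (c.map (fun e => (chosen.map (fun x => pvCell C x e)).sum)).sum

theorem if_gt_eq_max (s b : Int) : (if s > b then s else b) = max b s := by
  rw [max_def]; split_ifs <;> omega

theorem combsA_length {r : Nat} {l : List Int} {c : List Int} (h : c ∈ combsA r l) :
    c.length = r := by
  induction l generalizing r c with
  | nil => cases r with
    | zero => simp [combsA] at h; simp [h]
    | succ r => simp [combsA] at h
  | cons x xs ih =>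
    cases r with
    | zero => simp [combsA] at h; simp [h]
    | succ r =>
      simp only [combsA, List.mem_append, List.mem_map] at h
      rcases h with ⟨c', hc', rfl⟩ | h
      · simp [ih hc']
      · exact ih h

theorem combsA_nil_of_short {r : Nat} {l : List Int} (h : l.length < r) : combsA r l = [] := by
  induction l generalizing r with
  | nil => cases r with
    | zero => omega
    | succ r => rfl
  | cons x xs ih =>
    cases r with
    | zero => omega
    | succ r =>
      simp only [combsA]
      have h1 : xs.length < r := by simp at h; omega
      have h2 : xs.length < r + 1 := by omega
      simp [ih h1, ih h2]

theorem pyRange_succ_map (a b : Int) :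
    PySem.List.pyRange (a + 1) (b + 1) 1 = (PySem.List.pyRange a b 1).map (· + 1) := by
  rw [PySem.List.pyRange_one, PySem.List.pyRange_one]
  have : (b + 1 - (a + 1)) = b - a := by ring
  rw [this, List.map_map]
  apply List.map_congr_left
  intro k _; simp; ring

theorem pvCell_shift (_C : List (List Int)) (x0 : Int) (xs : List Int) (i : Int) (h : 0 ≤ i) :
    PySem.List.pyGetD (x0 :: xs) (i + 1) (0:Int) = PySem.List.pyGetD xs i 0 := by
  obtain ⟨m, rfl⟩ := Int.eq_ofNat_of_zero_le h
  have : ((m : Int) + 1) = ((m + 1 : Nat) : Int) := by push_cast; ring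
  rw [this, PySem.List.pyGetD_natCast, PySem.List.pyGetD_natCast]
  simp

-- fold of a running max from (max b d) equals max b (fold from d)
theorem foldl_max_shift {β : Type} (f : β → Int) (l : List β) (b d : Int) :
    l.foldl (fun acc x => max acc (f x)) (max b d) = max b (l.foldl (fun acc x => max acc (f x)) d) := by
  induction l generalizing d with
  | nil => rfl
  | cons x t ih => simp only [List.foldl_cons, max_assoc]; exact ih (max d (f x))

-- A's nested index loops compute the structural pairwise score
theorem scoreA_loop (C : List (List Int)) (c : List Int) : ∀ a : Int,
    (PySem.List.pyRange 0 (c.length : Int) 1).foldl (fun s i =>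
      (PySem.List.pyRange (i+1) (c.length : Int) 1).foldl (fun s j =>
        s + pvCell C (PySem.List.pyGetD c i 0) (PySem.List.pyGetD c j 0)) s) a
    = a + pscore C c := by
  induction c with
  | nil =>
    intro a
    rw [PySem.List.pyRange_one_eq_nil (by simp)]
    simp [pscore]
  | cons x xs ih =>
    intro a
    have hlen : (((x :: xs).length : Nat) : Int) = (xs.length : Int) + 1 := by
      simp [List.length_cons]
    rw [hlen, PySem.List.pyRange_one_cons (by omega : (0:Int) < (xs.length : Int) + 1)]
    simp only [List.foldl_cons]
    rw [PySem.List.pyGetD_zero_cons]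
    rw [pyRange_succ_map 0 (xs.length : Int)]
    simp only [List.foldl_map]
    have hinit : List.foldl (fun s j => s + pvCell C x (PySem.List.pyGetD (x :: xs) (j + 1) 0)) a
        (PySem.List.pyRange 0 (xs.length : Int) 1) = a + (xs.map (pvCell C x)).sum := by
      rw [PySem.List.foldl_congr_mem _ _ (fun s j => s + pvCell C x (PySem.List.pyGetD xs j 0)) _
          (by intro acc j hj
              rw [pvCell_shift C x xs j (PySem.List.mem_pyRange_one.mp hj).1]),
          PySem.List.foldl_pyRange_zero_pyGetD' xs 0 (fun s y => s + pvCell C x y) a,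
          PySem.List.foldl_add]
    rw [hinit]
    rw [PySem.List.foldl_congr_mem _ _ (fun s i =>
          List.foldl (fun s j => s + pvCell C (PySem.List.pyGetD xs i 0) (PySem.List.pyGetD xs j 0))
            s (PySem.List.pyRange (i + 1) (xs.length : Int) 1)) _
        (by intro acc i hi
            have hi0 : 0 ≤ i := (PySem.List.mem_pyRange_one.mp hi).1
            rw [pvCell_shift C x xs i hi0,
                pyRange_succ_map (i + 1) (xs.length : Int), List.foldl_map]
            exact PySem.List.foldl_congr_mem _ _
              (fun s j => s + pvCell C (PySem.List.pyGetD xs i 0) (PySem.List.pyGetD xs j 0)) _ (by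
              intro acc2 j hj
              have hj0 : 0 ≤ j := by
                have := (PySem.List.mem_pyRange_one.mp hj).1; omega
              rw [pvCell_shift C x xs j hj0]))]
    rw [ih]
    simp only [pscore]; ring

theorem score_cons (C : List (List Int)) (chosen c : List Int) (e s : Int) :
    s + cross C chosen (e :: c) + pscore C (e :: c)
    = (s + (chosen.map (fun x => pvCell C x e)).sum) + cross C (chosen ++ [e]) c + pscore C c := by
  simp only [cross, pscore, List.map_cons, List.sum_cons, List.map_append, List.sum_append,
    List.map_nil, List.sum_nil, add_zero]
  rw [PySem.List.sum_map_add_int c (fun y => (chosen.map (fun x => pvCell C x y)).sum)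
      (fun y => pvCell C e y)]
  ring

theorem foldl_max_inner {α β : Type} (l : List α) (gen : α → List β) (f : β → Int) :
    ∀ b0 : Int, -10^18 ≤ b0 →
    l.foldl (fun b e => (gen e).foldl (fun a c => max a (f c)) b) b0
    = l.foldl (fun b e => max b ((gen e).foldl (fun a c => max a (f c)) (-10^18))) b0 := by
  induction l with
  | nil => intro b0 _; rfl
  | cons x t ih =>
    intro b0 hb
    simp only [List.foldl_cons]
    have h1 : (gen x).foldl (fun a c => max a (f c)) b0
        = max b0 ((gen x).foldl (fun a c => max a (f c)) (-10^18)) := by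
      conv_lhs => rw [show b0 = max b0 (-10^18) from (max_eq_left hb).symm]
      exact foldl_max_shift f (gen x) b0 (-10^18)
    rw [h1, ih _ (le_trans hb (le_max_left _ _))]

theorem foldl_flatMap_max {α β : Type} (l : List α) (gen : α → List β) (f : β → Int) (b : Int) :
    (l.flatMap gen).foldl (fun acc c => max acc (f c)) b
    = l.foldl (fun acc e => (gen e).foldl (fun a c => max a (f c)) acc) b := by
  induction l generalizing b with
  | nil => rfl
  | cons x t ih => simp only [List.flatMap_cons, List.foldl_append, List.foldl_cons]; exact ih _

-- lexicographic decomposition of the combination list over an integer range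
theorem combsA_range_flatMap (n : Int) (r : Nat) :
    ∀ (d : Nat) (start : Int), (n - start).toNat = d →
    combsA (r + 1) (PySem.List.pyRange start n 1)
    = (PySem.List.pyRange start (n - (r : Int)) 1).flatMap
        (fun e => (combsA r (PySem.List.pyRange (e + 1) n 1)).map (fun c => e :: c)) := by
  intro d
  induction d with
  | zero =>
    intro start h0
    have hns : n ≤ start := by omega
    have hshort : (PySem.List.pyRange start n 1).length < r + 1 := by
      rw [PySem.List.length_pyRange_one]; omega
    rw [combsA_nil_of_short hshort,
        PySem.List.pyRange_one_eq_nil (by omega : n - (r : Int) ≤ start)]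
    rfl
  | succ d ih =>
    intro start hd
    by_cases hs : n - (r : Int) ≤ start
    · have hshort : (PySem.List.pyRange start n 1).length < r + 1 := by
        rw [PySem.List.length_pyRange_one]; omega
      rw [combsA_nil_of_short hshort, PySem.List.pyRange_one_eq_nil hs]
      rfl
    · rw [not_le] at hs
      have hsn : start < n := by omega
      rw [PySem.List.pyRange_one_cons hsn]
      show (combsA r (PySem.List.pyRange (start + 1) n 1)).map (fun c => start :: c)
            ++ combsA (r + 1) (PySem.List.pyRange (start + 1) n 1) = _
      rw [PySem.List.pyRange_one_cons hs, List.flatMap_cons,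
          ih (start + 1) (by omega)]

-- the DFS computes the best extension score over all (r+1)-subsets of [start, n)
theorem dfsB_eq (C : List (List Int)) (n : Int) (r : Nat) :
    ∀ (start : Int) (chosen : List Int) (s : Int),
    dfsB C n (r + 1) start chosen s
    = (combsA (r + 1) (PySem.List.pyRange start n 1)).foldl
        (fun b c => max b (s + cross C chosen c + pscore C c)) (-10^18) := by
  induction r with
  | zero =>
    intro start chosen s
    rw [combsA_range_flatMap n 0 (n - start).toNat start rfl, foldl_flatMap_max]
    simp only [combsA, List.map_cons, List.map_nil, List.foldl_cons, List.foldl_nil, dfsB]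
    rw [show n - (((0:Nat):Int) + 1) + 1 = n - ((0:Nat):Int) from by push_cast; ring]
    exact PySem.List.foldl_congr_mem _ _ _ _ (by
      intro b e _
      rw [if_gt_eq_max]
      simp [cross, pscore])
  | succ r ih =>
    intro start chosen s
    rw [combsA_range_flatMap n (r + 1) (n - start).toNat start rfl, foldl_flatMap_max,
        foldl_max_inner _ _ _ (-10^18) le_rfl]
    simp only [List.foldl_map]
    rw [dfsB]
    rw [show n - (((r + 1 : Nat):Int) + 1) + 1 = n - ((r + 1 : Nat):Int) from by push_cast; ring]
    refine PySem.List.foldl_congr_mem _ _ _ _ ?_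
    intro b e _
    dsimp only
    rw [if_gt_eq_max, ih (e + 1) (chosen ++ [e]) (s + (chosen.map (fun x => pvCell C x e)).sum)]
    congr 1
    exact PySem.List.foldl_congr_mem _ _ _ _ (by
      intro a c _
      rw [score_cons])

-- ===== VERDICT (by name: the statement is the Claim_ definition above) =====
theorem max_taste_spec : Claim_equal_max_taste := by
  intro n k C _hdom hpre
  obtain ⟨hk, _⟩ := hpre
  unfold Spec_max_taste max_taste max_taste_alt
  have hbest : (combsA k.toNat (PySem.List.pyRange 0 n 1)).foldl
      (fun best combo => let s := scoreA C k combo; if s > best then s else best) (-10^18)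
      = dfsB C n k.toNat 0 [] 0 := by
    cases hknat : k.toNat with
    | zero =>
      have hk0 : k = 0 := by omega
      subst hk0
      simp only [combsA, List.foldl_cons, List.foldl_nil, dfsB, scoreA]
      rw [PySem.List.pyRange_one_eq_nil (by norm_num : (0:Int) ≤ 0)]
      norm_num
    | succ r =>
      rw [dfsB_eq C n r 0 [] 0]
      refine PySem.List.foldl_congr_mem _ _ _ _ ?_
      intro b c hc
      have hlen : c.length = r + 1 := combsA_length hc
      have hkc : k = (c.length : Int) := by rw [hlen]; omega
      dsimp only
      rw [if_gt_eq_max, hkc]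
      unfold scoreA
      rw [scoreA_loop C c 0]
      simp [cross]
  rw [hbest]
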